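-- pv_equiv track=rewrite | github.com/EphraimHaber/advent-of-code-2023 | day-6/part-2/main.py | binary_search_for_last_number_to_not_win
-- ===== SOURCE A (Python) =====
-- def get_distance(speed: int, time: int):
--     return speed * time
--
-- def binary_search_for_last_number_to_not_win(distance_to_beat: int, total_race_time: int):
--     start, end = 0, total_race_time
--     while start <= end:
--         mid = (start + end) // 2
--         if get_distance(mid, total_race_time - mid) >= distance_to_beat:
--             start = mid + 1
--         else:
--             end = mid - 1
--     return start - 1
-- ===== SOURCE B (Python) =====
-- def _isqrt(n):
--     # floor square root of n >= 0, by binary search on the root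
--     lo, hi, ans = 0, n, 0
--     while lo <= hi:
--         mid = (lo + hi) // 2
--         if mid * mid <= n:
--             ans, lo = mid, mid + 1
--         else:
--             hi = mid - 1
--     return ans
--
-- def binary_search_for_last_number_to_not_win(distance_to_beat, total_race_time):
--     T = total_race_time
--     if T < 0:
--         return -1
--     disc = T * T - 4 * distance_to_beat
--     if disc < 0:
--         return -1
--     c = (T + _isqrt(disc)) // 2
--     if c > T:
--         c = T
--     if c >= 0 and c * (T - c) >= distance_to_beat:
--         return c
--     return -1
-- ===== Notes on version B (the rewrite author's own statement) =====
-- stated objective: alternative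
-- what changed: Replaces the binary search over hold times by a closed-form solution of the quadratic h*(T-h) >= d: compute the discriminant T^2-4d, take its integer square root, clamp the upper root to T and verify the candidate; no search over the race interval remains (only an integer sqrt).
import Mathlib
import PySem

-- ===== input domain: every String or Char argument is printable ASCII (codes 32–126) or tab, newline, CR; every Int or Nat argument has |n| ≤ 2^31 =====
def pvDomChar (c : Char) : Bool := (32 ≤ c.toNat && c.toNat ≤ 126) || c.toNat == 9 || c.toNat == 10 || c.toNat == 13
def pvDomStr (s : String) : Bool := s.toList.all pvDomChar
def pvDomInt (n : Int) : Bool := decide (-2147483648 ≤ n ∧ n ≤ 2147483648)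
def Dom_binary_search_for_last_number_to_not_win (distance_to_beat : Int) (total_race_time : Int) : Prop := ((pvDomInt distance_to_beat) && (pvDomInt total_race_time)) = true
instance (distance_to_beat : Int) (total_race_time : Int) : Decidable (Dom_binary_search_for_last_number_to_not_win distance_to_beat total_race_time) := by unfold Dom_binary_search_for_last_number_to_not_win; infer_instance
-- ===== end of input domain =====

-- B replaces A's binary search over hold times by the closed-form quadratic solution
-- (integer sqrt of the discriminant, clamped and verified); objective: alternative algorithm.

-- ===== PORT A =====
def get_distance (speed : Int) (time : Int) : Int := speed * time

-- the while loop of A, state (start, end); literal transliteration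
def aLoop (distance_to_beat : Int) (total_race_time : Int) (start : Int) (e : Int) : Int :=
  if h : start ≤ e then
    let mid := PySem.Int.floordiv (start + e) 2
    if get_distance mid (total_race_time - mid) ≥ distance_to_beat then
      aLoop distance_to_beat total_race_time (mid + 1) e
    else
      aLoop distance_to_beat total_race_time start (mid - 1)
  else
    start - 1
termination_by (e + 1 - start).toNat
decreasing_by
  · have := PySem.Int.floordiv_two_mid_bounds h
    omega
  · have := PySem.Int.floordiv_two_mid_bounds h
    omega

def binary_search_for_last_number_to_not_win (distance_to_beat : Int) (total_race_time : Int) : Int :=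
  aLoop distance_to_beat total_race_time 0 total_race_time

-- ===== PORT B =====
-- the while loop of _isqrt in Source B, state (lo, hi, ans)
def isqrtLoop (n : Int) (lo : Int) (hi : Int) (ans : Int) : Int :=
  if h : lo ≤ hi then
    let mid := PySem.Int.floordiv (lo + hi) 2
    if mid * mid ≤ n then
      isqrtLoop n (mid + 1) hi mid
    else
      isqrtLoop n lo (mid - 1) ans
  else
    ans
termination_by (hi + 1 - lo).toNat
decreasing_by
  · have := PySem.Int.floordiv_two_mid_bounds h
    omega
  · have := PySem.Int.floordiv_two_mid_bounds h
    omega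

def isqrtB (n : Int) : Int := isqrtLoop n 0 n 0

def binary_search_for_last_number_to_not_win_alt (distance_to_beat : Int) (total_race_time : Int) : Int :=
  let T := total_race_time
  if T < 0 then -1
  else
    let disc := T * T - 4 * distance_to_beat
    if disc < 0 then -1
    else
      let c0 := PySem.Int.floordiv (T + isqrtB disc) 2
      let c := if c0 > T then T else c0
      if c ≥ 0 ∧ c * (T - c) ≥ distance_to_beat then c else -1

-- ===== PRECONDITION & SPEC =====
def Spec_binary_search_for_last_number_to_not_win (distance_to_beat : Int) (total_race_time : Int) (out : Int) : Prop := out = binary_search_for_last_number_to_not_win_alt distance_to_beat total_race_time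
instance (distance_to_beat : Int) (total_race_time : Int) (out : Int) : Decidable (Spec_binary_search_for_last_number_to_not_win distance_to_beat total_race_time out) := by unfold Spec_binary_search_for_last_number_to_not_win; infer_instance

-- ===== CLAIM (what is proved, stated in full; the proofs are below) =====
def Claim_equal_binary_search_for_last_number_to_not_win : Prop := ∀ (distance_to_beat : Int) (total_race_time : Int), Dom_binary_search_for_last_number_to_not_win distance_to_beat total_race_time → Spec_binary_search_for_last_number_to_not_win distance_to_beat total_race_time (binary_search_for_last_number_to_not_win distance_to_beat total_race_time)

-- ===== LEMMAS AND PROOFS =====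

-- "hold time h wins": distance achieved ≥ distance to beat
def Wins (d : Int) (T : Int) (h : Int) : Prop := h * (T - h) ≥ d

-- characterization of the common result: largest winning hold time in [0,T]
def MaxW (d : Int) (T : Int) (m : Int) : Prop :=
  0 ≤ m ∧ m ≤ T ∧ Wins d T m ∧ ∀ h : Int, m < h → h ≤ T → ¬ Wins d T h

def NoW (d : Int) (T : Int) : Prop := ∀ h : Int, 0 ≤ h → h ≤ T → ¬ Wins d T h

lemma maxW_unique {d T m1 m2 : Int} (h1 : MaxW d T m1) (h2 : MaxW d T m2) : m1 = m2 := by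
  obtain ⟨a1, b1, c1, e1⟩ := h1
  obtain ⟨a2, b2, c2, e2⟩ := h2
  rcases lt_trichotomy m1 m2 with h | h | h
  · exact absurd c2 (e1 m2 h b2)
  · exact h
  · exact absurd c1 (e2 m1 h b1)

lemma fd2 {a : Int} (ha : 0 ≤ a) : PySem.Int.floordiv a 2 = a / 2 :=
  PySem.Int.floordiv_eq_ediv_of_pos (by omega)

-- A's loop when everything in [start, e] loses
lemma aLoop_all_fail (d T : Int) : ∀ s e : Int,
    (∀ h : Int, s ≤ h → h ≤ e → ¬ Wins d T h) → aLoop d T s e = s - 1 := by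
  intro s e
  induction s, e using aLoop.induct d T with
  | case1 s e hle mid hwin ih =>
    intro hall
    have hb := PySem.Int.floordiv_two_mid_bounds hle
    exact absurd hwin (hall mid hb.1 hb.2)
  | case2 s e hle mid hwin ih =>
    intro hall
    rw [aLoop]
    simp only [hle, dite_true]
    rw [if_neg hwin]
    exact ih (fun h hs he => hall h hs (by have := PySem.Int.floordiv_two_mid_bounds hle; omega))
  | case3 s e hgt =>
    intro _
    rw [aLoop]
    simp [hgt]

-- A's loop in the monotone phase (start is right of the peak)
lemma aLoop_phase2 (d T : Int) : ∀ s e : Int,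
    1 ≤ s → s ≤ T + 1 → e ≤ T → 2 * (s - 1) ≥ T - 1 → Wins d T (s - 1) →
    (∀ h : Int, e < h → h ≤ T → ¬ Wins d T h) →
    MaxW d T (aLoop d T s e) := by
  intro s e
  induction s, e using aLoop.induct d T with
  | case1 s e hle mid hwin ih =>
    intro h1 h2 h3 h4 h5 h6
    have hb := PySem.Int.floordiv_two_mid_bounds hle
    rw [aLoop]
    simp only [hle, dite_true]
    rw [if_pos hwin]
    exact ih (by omega) (by omega) h3 (by omega) (by simpa using hwin) h6
  | case2 s e hle mid hwin ih =>
    intro h1 h2 h3 h4 h5 h6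
    have hb := PySem.Int.floordiv_two_mid_bounds hle
    rw [aLoop]
    simp only [hle, dite_true]
    rw [if_neg hwin]
    refine ih h1 h2 (by omega) h4 h5 ?_
    intro h hgt hle2
    by_cases hcase : h ≤ e
    · -- mid ≤ h ≤ e ≤ T: f is non-increasing there since 2*mid ≥ T+1
      intro hw
      apply hwin
      unfold get_distance
      unfold Wins at hw
      nlinarith [h4, hgt, hcase]
    · exact h6 h (by omega) hle2
  | case3 s e hgt =>
    intro h1 h2 h3 h4 h5 h6
    rw [aLoop]
    simp only [hgt, dite_false]
    refine ⟨by omega, by omega, h5, ?_⟩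
    intro h hlt hle
    exact h6 h (by omega) hle

-- A computes MaxW or (-1 with NoW), for T ≥ 0
lemma a_char (d T : Int) (hT : 0 ≤ T) :
    MaxW d T (binary_search_for_last_number_to_not_win d T) ∨
    (binary_search_for_last_number_to_not_win d T = -1 ∧ NoW d T) := by
  unfold binary_search_for_last_number_to_not_win
  have hle : (0 : Int) ≤ T := hT
  rw [aLoop]
  simp only [hle, dite_true]
  set mid := PySem.Int.floordiv (0 + T) 2 with hmid
  have hmid2 : mid = T / 2 := by rw [hmid]; rw [show (0 : Int) + T = T by ring]; exact fd2 hT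
  have hbound : 0 ≤ mid ∧ mid ≤ T ∧ T - 1 ≤ 2 * mid ∧ 2 * mid ≤ T := by omega
  by_cases hwin : get_distance mid (T - mid) ≥ d
  · rw [if_pos hwin]
    left
    refine aLoop_phase2 d T (mid + 1) T (by omega) (by omega) le_rfl (by omega)
      (by simpa using hwin) (by intro h hgt hle2; omega)
  · rw [if_neg hwin]
    right
    have hnall : ∀ h : Int, ¬ Wins d T h := by
      intro h hw
      apply hwin
      unfold get_distance
      unfold Wins at hw
      -- mid maximizes h*(T-h) over the integers: (mid-h)*(T-mid-h) ≥ 0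
      have key : (mid - h) * (T - mid - h) ≥ 0 := by
        rcases Int.lt_or_le mid h with hc | hc
        · nlinarith [mul_nonneg (show (0:Int) ≤ h - mid by omega) (show (0:Int) ≤ mid + h - T by omega)]
        · exact mul_nonneg (by omega) (by omega)
      nlinarith [key]
    constructor
    · have := aLoop_all_fail d T 0 (mid - 1) (fun h _ _ => hnall h)
      omega
    · intro h _ _; exact hnall h

-- isqrt loop invariant
lemma isqrtLoop_char (n : Int) (hn : 0 ≤ n) : ∀ lo hi ans : Int,
    0 ≤ lo → 0 ≤ ans → ans * ans ≤ n → (ans = lo - 1 ∨ (ans = 0 ∧ lo = 0)) →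
    (∀ x : Int, hi < x → 0 ≤ x → n < x * x) →
    0 ≤ isqrtLoop n lo hi ans ∧ isqrtLoop n lo hi ans * isqrtLoop n lo hi ans ≤ n ∧
      n < (isqrtLoop n lo hi ans + 1) * (isqrtLoop n lo hi ans + 1) := by
  intro lo hi ans
  induction lo, hi, ans using isqrtLoop.induct n with
  | case1 lo hi ans hle mid hsq ih =>
    intro i1 i2 i3 i4 i5
    have hb := PySem.Int.floordiv_two_mid_bounds hle
    rw [isqrtLoop]
    simp only [hle, dite_true]
    rw [if_pos hsq]
    exact ih (by omega) (by omega) hsq (by omega) i5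
  | case2 lo hi ans hle mid hsq ih =>
    intro i1 i2 i3 i4 i5
    have hb := PySem.Int.floordiv_two_mid_bounds hle
    rw [isqrtLoop]
    simp only [hle, dite_true]
    rw [if_neg hsq]
    refine ih i1 i2 i3 i4 ?_
    intro x hx hx0
    by_cases hcase : hi < x
    · exact i5 x hcase hx0
    · -- mid ≤ x: x*x ≥ mid*mid > n
      push_neg at hsq
      nlinarith [hsq, hx, hx0, hb.1, i1]
  | case3 lo hi ans hgt =>
    intro i1 i2 i3 i4 i5
    rw [isqrtLoop]
    simp only [hgt, dite_false]
    refine ⟨i2, i3, ?_⟩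
    rcases i4 with h | h
    · exact i5 (ans + 1) (by omega) (by omega)
    · exact i5 (ans + 1) (by omega) (by omega)

lemma isqrtB_char (n : Int) (hn : 0 ≤ n) :
    0 ≤ isqrtB n ∧ isqrtB n * isqrtB n ≤ n ∧ n < (isqrtB n + 1) * (isqrtB n + 1) := by
  unfold isqrtB
  refine isqrtLoop_char n hn 0 n 0 le_rfl le_rfl (by simpa) (Or.inr ⟨rfl, rfl⟩) ?_
  intro x hx hx0
  nlinarith

-- winning is equivalent to (T - 2h)² ≤ disc
lemma wins_iff_sq (d T h : Int) : Wins d T h ↔ (T - 2 * h) * (T - 2 * h) ≤ T * T - 4 * d := by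
  unfold Wins
  constructor <;> intro hw <;> nlinarith

-- B computes MaxW or (-1 with NoW), for T ≥ 0
lemma b_char (d T : Int) (hT : 0 ≤ T) :
    MaxW d T (binary_search_for_last_number_to_not_win_alt d T) ∨
    (binary_search_for_last_number_to_not_win_alt d T = -1 ∧ NoW d T) := by
  unfold binary_search_for_last_number_to_not_win_alt
  rw [if_neg (by omega)]
  by_cases hdisc : T * T - 4 * d < 0
  · rw [if_pos hdisc]
    right
    refine ⟨rfl, ?_⟩
    intro h _ _ hw
    rw [wins_iff_sq] at hw
    nlinarith [sq_nonneg (T - 2 * h)]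
  · rw [if_neg hdisc]
    push_neg at hdisc
    set disc := T * T - 4 * d with hdiscdef
    obtain ⟨hr0, hr1, hr2⟩ := isqrtB_char disc hdisc
    set r := isqrtB disc with hrdef
    -- winning ↔ T - r ≤ 2h ≤ T + r
    have hwiff : ∀ h : Int, Wins d T h ↔ (T - r ≤ 2 * h ∧ 2 * h ≤ T + r) := by
      intro h
      rw [wins_iff_sq]
      constructor
      · intro hw
        constructor <;> by_contra hc <;> push_neg at hc <;> nlinarith
      · intro ⟨hc1, hc2⟩; nlinarith
    have hc0 : PySem.Int.floordiv (T + r) 2 = (T + r) / 2 := fd2 (by omega)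
    set c0 := PySem.Int.floordiv (T + r) 2 with hc0def
    have hc0b : 2 * c0 ≤ T + r ∧ T + r ≤ 2 * c0 + 1 := by omega
    set c := if c0 > T then T else c0 with hcdef
    have hcT : c ≤ T := by rw [hcdef]; split <;> omega
    by_cases hchk : c ≥ 0 ∧ c * (T - c) ≥ d
    · rw [if_pos hchk]
      left
      refine ⟨hchk.1, hcT, hchk.2, ?_⟩
      intro h hgt hhT hw
      rw [hwiff] at hw
      -- h ≤ c0 and h ≤ T, so h ≤ c
      have hhc0 : h ≤ c0 := by omega
      have : h ≤ c := by rw [hcdef]; split <;> omega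
      omega
    · rw [if_neg hchk]
      right
      refine ⟨rfl, ?_⟩
      intro h hh0 hhT hw
      rw [hwiff] at hw
      apply hchk
      have hhc0 : h ≤ c0 := by omega
      have hhc : h ≤ c := by rw [hcdef]; split <;> omega
      have hc0' : 0 ≤ c := by omega
      refine ⟨hc0', ?_⟩
      have hcw : Wins d T c := by
        rw [hwiff]
        constructor
        · omega
        · rw [hcdef]; split
          · omega
          · omega
      exact hcw

-- ===== VERDICT (by name: the statement is the Claim_ definition above) =====
theorem binary_search_for_last_number_to_not_win_spec : Claim_equal_binary_search_for_last_number_to_not_win := by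
  intro d T _
  unfold Spec_binary_search_for_last_number_to_not_win
  by_cases hT : T < 0
  · have ha : binary_search_for_last_number_to_not_win d T = -1 := by
      unfold binary_search_for_last_number_to_not_win
      rw [aLoop]
      simp only [show ¬ ((0:Int) ≤ T) by omega, dite_false]
      decide
    have hb : binary_search_for_last_number_to_not_win_alt d T = -1 := by
      unfold binary_search_for_last_number_to_not_win_alt
      simp only [hT, if_true]
    rw [ha, hb]
  · push_neg at hT
    rcases a_char d T hT with ha | ⟨ha, hano⟩ <;> rcases b_char d T hT with hb | ⟨hb, hbno⟩
    · exact maxW_unique ha hb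
    · exact absurd ha.2.2.1 (hbno _ ha.1 ha.2.1)
    · exact absurd hb.2.2.1 (hano _ hb.1 hb.2.1)
    · rw [ha, hb]
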